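-- pv_equiv track=rewrite | github.com/themichaelusa/dealeye | twitter_scraper.py | get_probable_tlink
-- ===== SOURCE A (Python) =====
-- def get_probable_tlink(desc):
-- 	titles = {'ceo', 'cfo', 'cto', 'founder', 'co-founder', 'cofounder'}
-- 	for idx, word in enumerate(desc):
-- 		for title in titles:
-- 			if title in word:
-- 				for word_pos in range(idx, len(desc)):
-- 					if desc[word_pos][0] == '@':
-- 						return desc[word_pos]
--
-- 	# todo: check for examples like these : @cryptonomics\nPhD
-- 	# todo: check if title in desc string, and if that's in url
-- 	return None
-- ===== SOURCE B (Python) =====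
-- def get_probable_tlink(desc):
-- 	titles = ('ceo', 'cfo', 'cto', 'founder', 'co-founder', 'cofounder')
-- 	seen_title = False
-- 	for word in desc:
-- 		seen_title = seen_title or any(t in word for t in titles)
-- 		if seen_title and word.startswith('@'):
-- 			return word
-- 	return None
-- ===== Notes on version B (the rewrite author's own statement) =====
-- stated objective: alternative
-- what changed: B replaces A's triple-nested loop (which, at every title-containing position and for every matching title, rescans the whole suffix for an '@'-word) with a SINGLE forward pass carrying a boolean 'seen_title' accumulator: the flag flips at the first title-containing word and the pass returns the first '@'-prefixed word encountered while the flag is set.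
import Mathlib
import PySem

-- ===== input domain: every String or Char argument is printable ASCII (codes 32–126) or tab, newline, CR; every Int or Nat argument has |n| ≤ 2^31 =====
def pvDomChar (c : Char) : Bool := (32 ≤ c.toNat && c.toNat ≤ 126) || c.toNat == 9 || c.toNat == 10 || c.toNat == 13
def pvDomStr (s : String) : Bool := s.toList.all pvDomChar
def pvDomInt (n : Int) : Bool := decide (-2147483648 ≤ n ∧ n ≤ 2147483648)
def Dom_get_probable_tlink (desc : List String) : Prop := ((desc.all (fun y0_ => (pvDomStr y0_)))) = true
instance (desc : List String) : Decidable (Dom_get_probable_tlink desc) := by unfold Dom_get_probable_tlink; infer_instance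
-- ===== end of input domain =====

-- B replaces A's triple-nested loop by ONE forward pass with a boolean 'seen_title' accumulator;
-- equivalence is proved on Pre_, which excludes exactly the inputs where A raises IndexError on desc[word_pos][0].

-- ===== PORT A =====
-- the Python set literal of titles (element list; A builds a set from it)
def pvTitles : List String := ["ceo", "cfo", "cto", "founder", "co-founder", "cofounder"]

-- inner loop 'for word_pos in range(idx, len(desc))'; result: none = fell through,
-- some none = IndexError on desc[word_pos][0] (empty word; excluded by Pre_), some (some w) = return w
def pvScanA (desc : List String) (idxs : List Int) : Option (Option String) :=
  match idxs with
  | [] => none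
  | i :: rest =>
    match PySem.List.pyGet? desc i with
    | none => some none          -- unreachable: range indices are in bounds
    | some w =>
      match PySem.Str.pyGet? w 0 with
      | none => some none        -- Python raises IndexError here (w = '')
      | some c => if c = '@' then some (some w) else pvScanA desc rest

-- middle loop 'for title in titles'
def pvTitlesA (desc : List String) (idx : Int) (word : String) (ts : List String) : Option (Option String) :=
  match ts with
  | [] => none
  | t :: rest =>
    if PySem.Str.isIn t word then
      match pvScanA desc (PySem.List.pyRange idx (PySem.List.len desc) 1) with
      | some r => some r
      | none => pvTitlesA desc idx word rest
    else pvTitlesA desc idx word rest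

-- outer loop 'for idx, word in enumerate(desc)'
def pvOuterA (desc : List String) (pairs : List (Int × String)) : Option (Option String) :=
  match pairs with
  | [] => none
  | (idx, word) :: rest =>
    match pvTitlesA desc idx word (PySem.Set.ofList pvTitles) with
    | some r => some r
    | none => pvOuterA desc rest

def get_probable_tlink (desc : List String) : Option String :=
  match pvOuterA desc (PySem.List.enumerate desc) with
  | some r => r                  -- early return (the raise case 'some none' is excluded by Pre_)
  | none => none

-- ===== PORT B =====
-- 'any(t in word for t in titles)'
def pvHasTitleB (word : String) : Bool := pvTitles.any (fun t => PySem.Str.isIn t word)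

-- the single 'for word in desc' loop, carrying the 'seen_title' flag
def pvLoopB (seen : Bool) (ws : List String) : Option String :=
  match ws with
  | [] => none
  | w :: rest =>
    let s := seen || pvHasTitleB w
    if s && PySem.Str.startswith w "@" then some w else pvLoopB s rest

def get_probable_tlink_alt (desc : List String) : Option String :=
  pvLoopB false desc

-- ===== PRECONDITION & SPEC =====
-- Pre_ excludes exactly the inputs on which Python A raises IndexError: those where, i being the
-- FIRST index whose word contains a title, some empty string occurs at j ≥ i with no '@'-word in [i, j).
def Pre_get_probable_tlink (desc : List String) : Prop :=
  ∀ j < desc.length, ∀ i ≤ j,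
    pvHasTitleB (desc.getD i "") = true →
    (∀ i' < i, pvHasTitleB (desc.getD i' "") = false) →
    desc.getD j "" = "" →
    ∃ k < j, i ≤ k ∧ PySem.Str.startswith (desc.getD k "") "@" = true
instance (desc : List String) : Decidable (Pre_get_probable_tlink desc) := by
  unfold Pre_get_probable_tlink; exact @Nat.decidableBallLT _ _ (fun _ _ => inferInstance)

def pvWitness_get_probable_tlink : List String := ["our", "ceo", "@boss", "", "rocks"]

def Spec_get_probable_tlink (desc : List String) (out : Option String) : Prop :=
  out = get_probable_tlink_alt desc
instance (desc : List String) (out : Option String) : Decidable (Spec_get_probable_tlink desc out) := by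
  unfold Spec_get_probable_tlink; infer_instance

-- ===== CLAIM (what is proved, stated in full; the proofs are below) =====
def Claim_equal_get_probable_tlink : Prop :=
  ∀ (desc : List String), Dom_get_probable_tlink desc → Pre_get_probable_tlink desc →
    Spec_get_probable_tlink desc (get_probable_tlink desc)

-- ===== LEMMAS AND PROOFS =====

-- the list A's inner scan walks, expressed structurally
def pvScanL : List String → Option (Option String)
  | [] => none
  | w :: rest =>
    match PySem.Str.pyGet? w 0 with
    | none => some none
    | some c => if c = '@' then some (some w) else pvScanL rest

-- proof-side view of B's pass once the flag is set: the first '@'-prefixed word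
def pvFindAt (ws : List String) : Option String :=
  match ws with
  | [] => none
  | w :: rest => if PySem.Str.startswith w "@" then some w else pvFindAt rest

theorem pvLoopB_true (ws : List String) : pvLoopB true ws = pvFindAt ws := by
  induction ws with
  | nil => rfl
  | cons w rest ih => simp [pvLoopB, pvFindAt, ih]

theorem pvStartswith_at (w : String) :
    PySem.Str.startswith w "@" = (PySem.Str.pyGet? w 0 == some '@') := by
  have h0 : PySem.Str.pyGet? w 0 = w.toList[0]? := by simpa using PySem.Str.pyGet?_natCast w 0
  have hs : PySem.Str.startswith w "@" = PySem.Chars.startswith w.toList "@".toList := by simp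
  have ha : "@".toList = ['@'] := by decide
  rw [h0, hs, ha]
  cases h : w.toList with
  | nil => simp [PySem.Chars.startswith, List.isPrefixOf]
  | cons c cs =>
    simp [PySem.Chars.startswith, List.isPrefixOf]
    exact eq_comm

theorem pvScanA_eq (desc : List String) (k : Nat) :
    pvScanA desc (PySem.List.pyRange (k : Int) (PySem.List.len desc) 1) = pvScanL (desc.drop k) := by
  induction hn : desc.length - k generalizing k with
  | zero =>
    have hk : desc.length ≤ k := by omega
    rw [PySem.List.pyRange_one_eq_nil (by simp [PySem.List.len_eq]; exact_mod_cast hk),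
        List.drop_eq_nil_of_le hk]
    rfl
  | succ n ih =>
    have hk : k < desc.length := by omega
    rw [PySem.List.pyRange_one_cons (by simp [PySem.List.len_eq]; exact_mod_cast hk)]
    have hd : desc.drop k = desc[k] :: desc.drop (k + 1) := List.drop_eq_getElem_cons hk
    have hcast : ((k : Int) + 1) = ((k + 1 : Nat) : Int) := by push_cast; ring
    rw [hd]
    show (match PySem.List.pyGet? desc (k : Int) with
      | none => some none
      | some w =>
        match PySem.Str.pyGet? w 0 with
        | none => some none
        | some c => if c = '@' then some (some w)
                    else pvScanA desc (PySem.List.pyRange ((k : Int) + 1) (PySem.List.len desc) 1)) = _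
    rw [show PySem.List.pyGet? desc (k : Int) = some desc[k] from by simp [hk]]
    simp only [pvScanL, hcast, ih (k + 1) (by omega)]

theorem pvTitlesA_eq (desc : List String) (idx : Int) (word : String) (ts : List String) :
    pvTitlesA desc idx word ts =
      if ts.any (fun t => PySem.Str.isIn t word) then
        pvScanA desc (PySem.List.pyRange idx (PySem.List.len desc) 1)
      else none := by
  induction ts with
  | nil => simp [pvTitlesA]
  | cons t rest ih =>
    by_cases hin : PySem.Str.isIn t word = true
    · have hany : ((t :: rest).any fun t => PySem.Str.isIn t word) = true := by
        simp only [List.any_cons, hin, Bool.true_or]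
      rw [show pvTitlesA desc idx word (t :: rest)
            = (match pvScanA desc (PySem.List.pyRange idx (PySem.List.len desc) 1) with
               | some r => some r
               | none => pvTitlesA desc idx word rest) from by
            simp only [pvTitlesA]; rw [if_pos hin]]
      rw [hany, if_pos rfl]
      cases hscan : pvScanA desc (PySem.List.pyRange idx (PySem.List.len desc) 1) with
      | some r => rfl
      | none =>
        show pvTitlesA desc idx word rest = none
        rw [ih, hscan]
        split <;> rfl
    · have hany : ((t :: rest).any fun t => PySem.Str.isIn t word)
          = (rest.any fun t => PySem.Str.isIn t word) := by
        simp only [List.any_cons, Bool.not_eq_true] at *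
        rw [hin, Bool.false_or]
      rw [show pvTitlesA desc idx word (t :: rest) = pvTitlesA desc idx word rest from by
            simp only [pvTitlesA]; rw [if_neg hin]]
      rw [ih, hany]

theorem pvScanL_ret (ws : List String) (x : String) (h : pvScanL ws = some (some x)) :
    pvFindAt ws = some x := by
  induction ws with
  | nil => simp [pvScanL] at h
  | cons w rest ih =>
    rw [pvScanL] at h
    rw [pvFindAt, pvStartswith_at]
    cases hg : PySem.Str.pyGet? w 0 with
    | none => rw [hg] at h; simp at h
    | some c =>
      rw [hg] at h
      by_cases hc : c = '@'
      · subst hc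
        simp at h
        simp [h]
      · have hb : (some c == some '@') = false := by simp [hc]
        simp [hc] at h
        simp [hb]
        exact ih h

theorem pvScanL_none (ws : List String) (h : pvScanL ws = none) :
    ∀ w ∈ ws, ∃ c, PySem.Str.pyGet? w 0 = some c ∧ c ≠ '@' := by
  induction ws with
  | nil => simp
  | cons w rest ih =>
    rw [pvScanL] at h
    cases hg : PySem.Str.pyGet? w 0 with
    | none => rw [hg] at h; simp at h
    | some c =>
      rw [hg] at h
      by_cases hc : c = '@'
      · simp [hc] at h
      · simp [hc] at h
        intro w' hw'
        cases List.mem_cons.mp hw' with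
        | inl he => rw [he]; exact ⟨c, hg, hc⟩
        | inr hm => exact ih h w' hm

theorem pvScanL_none_of (ws : List String)
    (h : ∀ w ∈ ws, ∃ c, PySem.Str.pyGet? w 0 = some c ∧ c ≠ '@') : pvScanL ws = none := by
  induction ws with
  | nil => rfl
  | cons w rest ih =>
    obtain ⟨c, hg, hc⟩ := h w (by simp)
    rw [pvScanL, hg]
    simp [hc]
    exact ih fun w' hw' => h w' (by simp [hw'])

theorem pvFindAt_none (ws : List String)
    (h : ∀ w ∈ ws, ∃ c, PySem.Str.pyGet? w 0 = some c ∧ c ≠ '@') : pvFindAt ws = none := by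
  induction ws with
  | nil => rfl
  | cons w rest ih =>
    obtain ⟨c, hg, hc⟩ := h w (by simp)
    rw [pvFindAt, pvStartswith_at, hg]
    simp [hc]
    exact ih fun w' hw' => h w' (by simp [hw'])

theorem pvScanL_raise (ws : List String) (h : pvScanL ws = some none) :
    ∃ j < ws.length, ws.getD j "" = "" ∧
      ∀ m < j, PySem.Str.startswith (ws.getD m "") "@" = false := by
  induction ws with
  | nil => simp [pvScanL] at h
  | cons w rest ih =>
    rw [pvScanL] at h
    cases hg : PySem.Str.pyGet? w 0 with
    | none =>
      refine ⟨0, by simp, ?_, by omega⟩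
      have h0 : w.toList[0]? = none := by simpa using (PySem.Str.pyGet?_natCast w 0).symm.trans hg
      have : w.toList = [] := by
        cases hw : w.toList with
        | nil => rfl
        | cons a as => rw [hw] at h0; simp at h0
      have hw : w = "" := String.toList_eq_nil_iff.mp this
      simp [hw]
    | some c =>
      rw [hg] at h
      by_cases hc : c = '@'
      · simp [hc] at h
      · simp [hc] at h
        obtain ⟨j, hj, hemp, hall⟩ := ih h
        refine ⟨j + 1, by simpa using Nat.succ_lt_succ hj, by simpa using hemp, ?_⟩
        intro m hm
        cases m with
        | zero =>
          rw [show (w :: rest).getD 0 "" = w from rfl, pvStartswith_at, hg]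
          simp [hc]
        | succ m' => simpa using hall m' (by omega)

theorem pvOuterA_none (desc : List String) :
    ∀ (tail : List String) (k : Nat), tail = desc.drop k →
    (∀ w ∈ tail, ∃ c, PySem.Str.pyGet? w 0 = some c ∧ c ≠ '@') →
    pvOuterA desc (PySem.List.enumerate tail (k : Int)) = none := by
  intro tail
  induction tail with
  | nil => intro k _ _; rfl
  | cons w rest ih =>
    intro k htail hgood
    rw [PySem.List.enumerate_cons, pvOuterA,
        pvTitlesA_eq, pvScanA_eq desc k, ← htail]
    have hscan : pvScanL (w :: rest) = none := pvScanL_none_of _ hgood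
    have hcast : ((k : Int) + 1) = ((k + 1 : Nat) : Int) := by push_cast; ring
    have hrest : rest = desc.drop (k + 1) := by
      calc rest = (w :: rest).drop 1 := rfl
        _ = (desc.drop k).drop 1 := by rw [← htail]
        _ = desc.drop (k + 1) := List.drop_drop
    rw [hscan, hcast, ite_self]
    exact ih (k + 1) hrest (fun w' hw' => hgood w' (by simp [hw']))

theorem pvMain (desc : List String) (hpre : Pre_get_probable_tlink desc) :
    ∀ (tail : List String) (k : Nat), tail = desc.drop k →
    (∀ i' < k, pvHasTitleB (desc.getD i' "") = false) →
    (match pvOuterA desc (PySem.List.enumerate tail (k : Int)) with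
     | some r => r | none => none) = pvLoopB false tail := by
  intro tail
  induction tail with
  | nil => intro k _ _; rfl
  | cons w rest ih =>
    intro k htail hmin
    have hklen : k < desc.length := by
      by_contra hk
      have : desc.drop k = [] := List.drop_eq_nil_of_le (by omega)
      rw [this] at htail; exact absurd htail (by simp)
    have hwk : desc.getD k "" = w := by
      have := congrArg (fun l => l.getD 0 "") htail
      simpa [List.getD, List.getElem?_drop] using this.symm
    have hrest : rest = desc.drop (k + 1) := by
      calc rest = (w :: rest).drop 1 := rfl
        _ = (desc.drop k).drop 1 := by rw [← htail]
        _ = desc.drop (k + 1) := List.drop_drop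
    have hcast : ((k : Int) + 1) = ((k + 1 : Nat) : Int) := by push_cast; ring
    rw [PySem.List.enumerate_cons, pvOuterA,
        pvTitlesA_eq, pvScanA_eq desc k, ← htail]
    have hset : (PySem.Set.ofList pvTitles : List String) = pvTitles := by decide
    rw [hset]
    have hany : (pvTitles.any fun t => PySem.Str.isIn t w) = pvHasTitleB w := rfl
    rw [hany]
    cases hht : pvHasTitleB w with
    | false =>
      simp only [Bool.false_eq_true, if_false]
      have hB : pvLoopB false (w :: rest) = pvLoopB false rest := by
        simp [pvLoopB, hht]
      rw [hB, hcast]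
      exact ih (k + 1) hrest (fun i' hi' => by
        rcases Nat.lt_succ_iff_lt_or_eq.mp hi' with h | h
        · exact hmin i' h
        · subst h; rw [hwk]; exact hht)
    | true =>
      have hB : pvLoopB false (w :: rest) = pvFindAt (w :: rest) := by
        simp [pvLoopB, pvFindAt, hht, pvLoopB_true]
      rw [if_pos rfl, hB]
      cases hscan : pvScanL (w :: rest) with
      | some r =>
        cases r with
        | some x => simp [(pvScanL_ret _ _ hscan)]
        | none =>
          -- A would raise here; contradiction with Pre_
          exfalso
          obtain ⟨j, hj, hemp, hall⟩ := pvScanL_raise _ hscan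
          have hlen : (w :: rest).length = desc.length - k := by
            rw [htail]; simp
          have hjlen : k + j < desc.length := by omega
          have hgd : ∀ m, m < (w :: rest).length → (w :: rest).getD m "" = desc.getD (k + m) "" := by
            intro m hm
            rw [htail]
            simp [List.getD, List.getElem?_drop]
          obtain ⟨k', hk', hk'2, hsw⟩ :=
            hpre (k + j) hjlen k (by omega) (by rw [hwk]; exact hht) hmin
              (by rw [← hgd j hj]; exact hemp)
          have hm : k' - k < j := by omega
          have := hall (k' - k) hm
          rw [hgd (k' - k) (by omega)] at this
          rw [show k + (k' - k) = k' from by omega] at this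
          rw [this] at hsw; exact absurd hsw (by simp)
      | none =>
        have hgood := pvScanL_none _ hscan
        have hA : pvOuterA desc (PySem.List.enumerate rest ((k : Int) + 1)) = none := by
          rw [hcast]
          exact pvOuterA_none desc rest (k + 1) hrest
            (fun w' hw' => hgood w' (by simp [hw']))
        rw [hA]
        exact (pvFindAt_none _ hgood).symm

-- ===== VERDICT (by name: the statement is the Claim_ definition above) =====
theorem get_probable_tlink_spec : Claim_equal_get_probable_tlink := by
  intro desc _ hpre
  unfold Spec_get_probable_tlink get_probable_tlink get_probable_tlink_alt
  have h := pvMain desc hpre desc 0 (by simp) (by omega)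
  simpa using h
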